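-- pv_equiv track=rewrite | github.com/SerGobec/2021-knu-smish | e.dyrda/generators/Trigram/smishing/generator.py | gen_trigrams
-- ===== SOURCE A (Python) =====
-- def gen_trigrams(tokens):
--     t0, t1 = '$', '$'
--     for t2 in tokens:
--         yield t0, t1, t2
--         if t2 in '.?':
--             yield t1, t2, '$'
--             yield t2, '$','$'
--             t0, t1 = '$', '$'
--         else:
--             t0, t1 = t1, t2
-- ===== SOURCE B (Python) =====
-- def _augmented(tokens):
--     # sentence-boundary sentinels are inserted into the stream itself
--     yield '$'
--     yield '$'
--     for t in tokens:
--         yield t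
--         if t in '.?':
--             yield '$'
--             yield '$'
--
-- def gen_trigrams(tokens):
--     it = _augmented(tokens)
--     a = next(it)
--     b = next(it)
--     for c in it:
--         yield a, b, c
--         a, b = b, c
-- ===== Notes on version B (the rewrite author's own statement) =====
-- stated objective: alternative
-- what changed: B replaces A's stateful reset/branch logic by first lazily inserting '$','$' boundary sentinels into the token stream and then taking a plain size-3 sliding window over the augmented stream.
import Mathlib
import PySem

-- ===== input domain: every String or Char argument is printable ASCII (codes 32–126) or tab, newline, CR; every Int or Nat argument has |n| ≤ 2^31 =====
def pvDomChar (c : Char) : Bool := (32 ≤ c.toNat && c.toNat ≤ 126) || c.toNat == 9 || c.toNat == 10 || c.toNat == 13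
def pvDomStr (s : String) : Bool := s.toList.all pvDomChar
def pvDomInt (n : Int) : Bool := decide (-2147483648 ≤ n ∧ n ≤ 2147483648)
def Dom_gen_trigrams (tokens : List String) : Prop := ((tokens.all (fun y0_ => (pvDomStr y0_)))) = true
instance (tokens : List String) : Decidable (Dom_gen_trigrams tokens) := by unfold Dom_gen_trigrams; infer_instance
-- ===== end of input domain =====

-- B replaces A's reset/branch state machine by inserting '$','$' sentinels into the stream
-- and taking a plain size-3 sliding window (alternative decomposition, same cost).

-- ===== PORT A =====
-- A's loop with rolling state (t0, t1); `t2 in '.?'` is PySem.Str.isIn (substring test).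
def gen_trigrams_go (t0 t1 : String) : List String → List (String × String × String)
  | [] => []
  | t2 :: ts =>
      (t0, t1, t2) ::
        (if PySem.Str.isIn t2 ".?" then
          (t1, t2, "$") :: (t2, "$", "$") :: gen_trigrams_go "$" "$" ts
        else
          gen_trigrams_go t1 t2 ts)

def gen_trigrams (tokens : List String) : List (String × String × String) :=
  gen_trigrams_go "$" "$" tokens

-- ===== PORT B =====
-- B's _augmented generator: each token, followed by '$','$' when it is a sentence end.
def gen_trigrams_aug : List String → List String
  | [] => []
  | t :: ts =>
      if PySem.Str.isIn t ".?" then t :: "$" :: "$" :: gen_trigrams_aug ts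
      else t :: gen_trigrams_aug ts

-- B's 3-element rolling window over the augmented stream.
def gen_trigrams_win3 : List String → List (String × String × String)
  | a :: b :: c :: rest => (a, b, c) :: gen_trigrams_win3 (b :: c :: rest)
  | _ => []

def gen_trigrams_alt (tokens : List String) : List (String × String × String) :=
  gen_trigrams_win3 ("$" :: "$" :: gen_trigrams_aug tokens)

-- ===== PRECONDITION & SPEC =====
def Spec_gen_trigrams (tokens : List String) (out : List (String × String × String)) : Prop := out = gen_trigrams_alt tokens
instance (tokens : List String) (out : List (String × String × String)) : Decidable (Spec_gen_trigrams tokens out) := by unfold Spec_gen_trigrams; infer_instance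

-- ===== CLAIM =====
def Claim_equal_gen_trigrams : Prop := ∀ (tokens : List String), Dom_gen_trigrams tokens → Spec_gen_trigrams tokens (gen_trigrams tokens)

-- ===== LEMMAS AND PROOFS =====
theorem win3_aug_eq_go (ts : List String) : ∀ (t0 t1 : String),
    gen_trigrams_win3 (t0 :: t1 :: gen_trigrams_aug ts) = gen_trigrams_go t0 t1 ts := by
  induction ts with
  | nil => intro t0 t1; rfl
  | cons t ts ih =>
      intro t0 t1
      simp only [gen_trigrams_aug, gen_trigrams_go]
      split_ifs with h
      · simp [gen_trigrams_win3, ih]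
      · simp [gen_trigrams_win3, ih]

-- ===== VERDICT =====
theorem gen_trigrams_spec : Claim_equal_gen_trigrams := by
  intro tokens _
  unfold Spec_gen_trigrams gen_trigrams gen_trigrams_alt
  exact (win3_aug_eq_go tokens "$" "$").symm
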